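-- pv_equiv track=rewrite | github.com/chaudharirohit2810/BashBird | IMAP/main.py | __separate_mail_headers
-- ===== SOURCE A (Python) =====
-- def __separate_mail_headers(msg):
--     '''Get individual mails from received'''
--
--     lines_arr = msg.splitlines()
--     ans = []
--     email = ""
--     prev_start = 0
--     index = 0
--     while index < len(lines_arr):
--         # This indicates the end of particular mail
--         if lines_arr[index] == "" and lines_arr[index + 1] == ")":
--             email = ""
--             for item in lines_arr[prev_start + 1:index]:
--                 email += item + "\n"
--             prev_start = index + 2
--             ans.append(email)
--         index += 1
--     return ans
-- ===== SOURCE B (Python) =====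
-- def __separate_mail_headers(msg):
--     '''Get individual mails from received: single-pass state machine over adjacent
--     line pairs, accumulating the current email's lines in a buffer and skipping
--     separator lines with a countdown, instead of index/slice arithmetic.'''
--     lines = msg.splitlines()
--     ans = []
--     buf = []
--     skip = 1  # the first line of each segment is never part of the email body
--     for cur, nxt in zip(lines, lines[1:]):
--         if cur == "" and nxt == ")":
--             ans.append("".join(l + "\n" for l in buf))
--             buf = []
--             skip = 2  # drop the ")" line and the one after it
--         elif skip:
--             skip -= 1
--         else:
--             buf.append(cur)
--     return ans
-- ===== Notes on version B (the rewrite author's own statement) =====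
-- stated objective: alternative
-- what changed: B replaces A's index-based detect-then-slice loop (prev_start bookkeeping plus re-slicing lines_arr for each email) with a single-pass state machine over adjacent line pairs that buffers the current email's lines as it goes and uses a skip countdown to drop separator lines, never slicing or indexing.
-- outside the precondition, e.g. on __separate_mail_headers('a\n\n'): A raises IndexError, B returns []
import Mathlib
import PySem

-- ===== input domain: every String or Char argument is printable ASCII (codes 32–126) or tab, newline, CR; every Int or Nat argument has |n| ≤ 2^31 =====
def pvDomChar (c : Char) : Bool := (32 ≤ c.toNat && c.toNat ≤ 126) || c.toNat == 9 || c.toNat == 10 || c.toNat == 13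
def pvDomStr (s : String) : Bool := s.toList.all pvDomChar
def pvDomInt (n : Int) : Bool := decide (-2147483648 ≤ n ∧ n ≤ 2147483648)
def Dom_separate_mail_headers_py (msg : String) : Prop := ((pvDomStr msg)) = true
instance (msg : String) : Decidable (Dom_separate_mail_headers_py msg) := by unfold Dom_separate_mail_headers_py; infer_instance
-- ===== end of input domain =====

-- B replaces A's index/prev_start detect-then-slice loop with a single-pass state
-- machine over adjacent line pairs (buffer + skip countdown), no slicing (objective: alternative).


-- ===== PORT A =====
-- A's while loop.  `lines_arr[index + 1]` raises IndexError in Python exactly when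
-- index + 1 = len (reached only when the last line is ""; excluded by Pre_); here
-- List.getD returns "" there, so the test is simply false.  Indices are in range /
-- nonnegative everywhere else, so List.getD is exact; the slice bounds are nonnegative,
-- so PySem.List.slice with natural-number casts is exact.
def pvALoop (lines : List String) (index : Nat) (prev_start : Nat) (ans : List String) : List String :=
  if index < lines.length then
    if lines.getD index "" == "" && lines.getD (index + 1) "" == ")" then
      let email := (PySem.List.slice lines (some ((prev_start + 1 : Nat) : Int)) (some ((index : Nat) : Int))).foldl
          (fun e item => e ++ item ++ "\n") ""
      pvALoop lines (index + 1) (index + 2) (ans ++ [email])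
    else
      pvALoop lines (index + 1) prev_start ans
  else ans
termination_by lines.length - index

def separate_mail_headers_py (msg : String) : List String :=
  pvALoop (PySem.Str.splitlines msg) 0 0 []

-- ===== PORT B =====
-- one transition of B's state machine; state = (ans, buf, skip)
def pvBStep (st : List String × List String × Nat) (p : String × String) :
    List String × List String × Nat :=
  if p.1 == "" && p.2 == ")" then
    (st.1 ++ [PySem.Str.join "" (st.2.1.map (fun l => l ++ "\n"))], [], 2)
  else if st.2.2 ≠ 0 then
    (st.1, st.2.1, st.2.2 - 1)
  else
    (st.1, st.2.1 ++ [p.1], 0)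

def separate_mail_headers_py_alt (msg : String) : List String :=
  let lines := PySem.Str.splitlines msg
  ((lines.zip lines.tail).foldl pvBStep ([], [], 1)).1

-- ===== PRECONDITION & SPEC =====
-- Pre_ excludes exactly the inputs whose last split line is empty: there A evaluates
-- lines_arr[index + 1] one past the end and raises IndexError (returns nothing).
def Pre_separate_mail_headers_py (msg : String) : Prop :=
  (PySem.Str.splitlines msg).getLast? ≠ some ""
instance (msg : String) : Decidable (Pre_separate_mail_headers_py msg) := by
  unfold Pre_separate_mail_headers_py; infer_instance
def pvWitness_separate_mail_headers_py : String := "Subject: hi\nbody line\n\n)"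

def Spec_separate_mail_headers_py (msg : String) (out : List String) : Prop := out = separate_mail_headers_py_alt msg
instance (msg : String) (out : List String) : Decidable (Spec_separate_mail_headers_py msg out) := by unfold Spec_separate_mail_headers_py; infer_instance

-- ===== CLAIM (what is proved, stated in full; the proofs are below) =====
def Claim_equal_separate_mail_headers_py : Prop := ∀ (msg : String), Dom_separate_mail_headers_py msg → Pre_separate_mail_headers_py msg → Spec_separate_mail_headers_py msg (separate_mail_headers_py msg)

-- ===== LEMMAS AND PROOFS =====

-- "".join(xs) appends the pieces.
lemma pvJoinEmptyCons (x : String) (xs : List String) :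
    PySem.Str.join "" (x :: xs) = x ++ PySem.Str.join "" xs := by
  cases xs with
  | nil => simp [PySem.Str.join, PySem.Chars.join_singleton, PySem.Chars.join_nil]
  | cons y ys => simp [PySem.Str.join, PySem.Chars.join_cons_cons]

-- A's `email += item + "\n"` loop equals "".join(item + "\n" for item in l).
lemma pvEmailFold (l : List String) :
    ∀ (s : String), l.foldl (fun e item => e ++ item ++ "\n") s
      = s ++ PySem.Str.join "" (l.map (fun item => item ++ "\n")) := by
  induction l with
  | nil => intro s; simp [PySem.Str.join, PySem.Chars.join_nil]
  | cons a t ih =>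
      intro s
      simp only [List.foldl_cons, List.map_cons, pvJoinEmptyCons, ih]
      simp [String.append_assoc]

-- A's loop from `index` equals B's fold over the remaining adjacent pairs, with
-- buf = lines[prev+1 : index] and skip = (prev+1) - index.
lemma pvALoop_eq (lines : List String) :
    ∀ (fuel index prev ans_ : _), lines.length - index = fuel →
      pvALoop lines index prev ans_
        = (((lines.zip lines.tail).drop index).foldl pvBStep
            (ans_, (lines.drop (prev + 1)).take (index - (prev + 1)), (prev + 1) - index)).1 := by
  intro fuel
  induction fuel with
  | zero =>
      intro index prev ans_ h
      rw [pvALoop, if_neg (by omega)]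
      rw [List.drop_eq_nil_of_le (as := lines.zip lines.tail)
        (by rw [List.length_zip, List.length_tail]; omega)]
      rfl
  | succ n ih =>
      intro index prev ans_ h
      have hlt : index < lines.length := by omega
      rw [pvALoop, if_pos hlt]
      by_cases h1 : index + 1 < lines.length
      · -- the pair (lines[index], lines[index+1]) is present
        have hpl : index < (lines.zip lines.tail).length := by
          rw [List.length_zip, List.length_tail]; omega
        rw [List.drop_eq_getElem_cons hpl, List.foldl_cons]
        have hpair : (lines.zip lines.tail)[index] =
            (lines[index]'hlt, lines[index+1]'h1) := by
          simp [List.getElem_zip, List.getElem_tail]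
        have hgd1 : lines.getD index "" = lines[index]'hlt := List.getD_eq_getElem _ _ hlt
        have hgd2 : lines.getD (index + 1) "" = lines[index+1]'h1 := List.getD_eq_getElem _ _ h1
        by_cases hc : (lines.getD index "" == "" && lines.getD (index + 1) "" == ")") = true
        · rw [if_pos hc]
          rw [ih (index + 1) (index + 2) _ (by omega)]
          have hbuf : PySem.List.slice lines (some ((prev + 1 : Nat) : Int)) (some ((index : Nat) : Int))
              = (lines.drop (prev + 1)).take (index - (prev + 1)) :=
            PySem.List.slice_natCast lines (prev + 1) index
          have hst : pvBStep (ans_, (lines.drop (prev + 1)).take (index - (prev + 1)), (prev + 1) - index)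
                ((lines.zip lines.tail)[index])
              = (ans_ ++ [(PySem.List.slice lines (some ((prev + 1 : Nat) : Int)) (some ((index : Nat) : Int))).foldl
                    (fun e item => e ++ item ++ "\n") ""],
                 (lines.drop (index + 2 + 1)).take (index + 1 - (index + 2 + 1)), index + 2 + 1 - (index + 1)) := by
            rw [hpair, pvBStep]
            rw [if_pos (by rw [← hgd1, ← hgd2]; exact hc)]
            rw [hbuf, pvEmailFold]
            have e1 : index + 1 - (index + 2 + 1) = 0 := by omega
            have e2 : index + 2 + 1 - (index + 1) = 2 := by omega
            rw [e1, e2, List.take_zero]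
            simp
          rw [hst]
        · rw [if_neg hc]
          rw [ih (index + 1) prev ans_ (by omega)]
          have hst : pvBStep (ans_, (lines.drop (prev + 1)).take (index - (prev + 1)), (prev + 1) - index)
                ((lines.zip lines.tail)[index])
              = (ans_, (lines.drop (prev + 1)).take (index + 1 - (prev + 1)), (prev + 1) - (index + 1)) := by
            rw [hpair, pvBStep]
            rw [if_neg (by rw [← hgd1, ← hgd2]; exact hc)]
            by_cases hs : (prev + 1) - index ≠ 0
            · rw [if_pos hs]
              have e1 : index - (prev + 1) = 0 := by omega
              have e2 : index + 1 - (prev + 1) = 0 := by omega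
              rw [e1, e2]
              have e3 : (prev + 1) - index - 1 = (prev + 1) - (index + 1) := by omega
              rw [e3]
            · rw [if_neg hs]
              have e2 : index + 1 - (prev + 1) = (index - (prev + 1)) + 1 := by omega
              rw [e2, List.take_add_one]
              have hget : (lines.drop (prev + 1))[index - (prev + 1)]? = some (lines[index]'hlt) := by
                rw [List.getElem?_drop]
                have e3 : prev + 1 + (index - (prev + 1)) = index := by omega
                rw [e3, List.getElem?_eq_getElem hlt]
              rw [hget]
              have e4 : (prev + 1) - index = 0 := by omega
              have e5 : (prev + 1) - (index + 1) = 0 := by omega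
              rw [e4, e5]
              simp
          rw [hst]
      · -- index = len - 1: no pair left, and the test is false (getD past the end is "")
        have hend : lines.getD (index + 1) "" = "" := by
          rw [List.getD_eq_getElem?_getD, List.getElem?_eq_none (by omega)]
          rfl
        rw [if_neg (by
          intro hq
          rw [Bool.and_eq_true] at hq
          rw [hend] at hq
          exact absurd hq.2 (by decide))]
        rw [ih (index + 1) prev ans_ (by omega)]
        rw [List.drop_eq_nil_of_le (as := lines.zip lines.tail)
              (by rw [List.length_zip, List.length_tail]; omega),
            List.drop_eq_nil_of_le (as := lines.zip lines.tail)
              (by rw [List.length_zip, List.length_tail]; omega)]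
        rfl

lemma pvMain (msg : String) : separate_mail_headers_py msg = separate_mail_headers_py_alt msg := by
  unfold separate_mail_headers_py separate_mail_headers_py_alt
  rw [pvALoop_eq (PySem.Str.splitlines msg) (PySem.Str.splitlines msg).length 0 0 [] (by omega)]
  rfl

-- ===== VERDICT (by name: the statement is the Claim_ definition above) =====
theorem separate_mail_headers_py_spec : Claim_equal_separate_mail_headers_py := by
  intro msg _ _
  unfold Spec_separate_mail_headers_py
  exact pvMain msg
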